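-- pv_equiv track=rewrite | github.com/beatbeast007/Permutex | permutex/estimator.py | estimate_combinations
-- ===== SOURCE A (Python) =====
-- from typing import Dict, List, Tuple
--
-- def estimate_combinations(
--     selected_categories: Dict[str, List[str]],
--     allow_self_combine: bool,
--     max_depth: int = 2,
--     manual_pairs: List[Tuple[str, str]] = None
-- ) -> int:
--     """
--     Estimate how many password combinations will be generated.
--
--     Args:
--         selected_categories: Dict of category name to list of values
--         allow_self_combine: If True, allows pairing same category with itself
--         max_depth: Max pair depth to consider (1 = single token use, 2 = pairs)
--         manual_pairs: If provided, only these (cat_a, cat_b) pairs are used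
--
--     Returns:
--         Estimated combination count (int)
--     """
--     if manual_pairs:
--         count = 0
--         for cat_a, cat_b in manual_pairs:
--             a_count = len(selected_categories.get(cat_a, []))
--             b_count = len(selected_categories.get(cat_b, []))
--             count += a_count * b_count
--         return count
--
--     categories = list(selected_categories.keys())
--
--     if max_depth == 1:
--         return sum(len(selected_categories[c]) for c in categories)
--
--     # Full pairwise combination (default mode)
--     total = 0
--     for cat_a in categories:
--         for cat_b in categories:
--             if not allow_self_combine and cat_a == cat_b:
--                 continue
--             a_len = len(selected_categories[cat_a])
--             b_len = len(selected_categories[cat_b])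
--             total += a_len * b_len
--     return total
-- ===== SOURCE B (Python) =====
-- def estimate_combinations(
--     selected_categories,
--     allow_self_combine,
--     max_depth=2,
--     manual_pairs=None
-- ):
--     """Precompute a {category: size} table once, then answer every mode from it:
--     manual pairs via table lookups, depth 1 as the plain sum, and the default
--     pairwise mode by the closed form S^2 - (sum of squares unless self-combine),
--     instead of A's pairwise double loop over the categories."""
--     sizes = {cat: len(vals) for cat, vals in selected_categories.items()}
--     if manual_pairs:
--         return sum(sizes.get(a, 0) * sizes.get(b, 0) for a, b in manual_pairs)
--     total = sum(sizes.values())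
--     if max_depth == 1:
--         return total
--     return total * total - (0 if allow_self_combine else sum(n * n for n in sizes.values()))
-- ===== Notes on version B (the rewrite author's own statement) =====
-- stated objective: alternative
-- what changed: Builds a {category: size} table in one pass and replaces A's pairwise double loop over categories with the closed form S^2 minus the sum of squared sizes (when self-combining is disallowed); the manual-pairs branch reads the precomputed table instead of re-measuring category lists.
import Mathlib
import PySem

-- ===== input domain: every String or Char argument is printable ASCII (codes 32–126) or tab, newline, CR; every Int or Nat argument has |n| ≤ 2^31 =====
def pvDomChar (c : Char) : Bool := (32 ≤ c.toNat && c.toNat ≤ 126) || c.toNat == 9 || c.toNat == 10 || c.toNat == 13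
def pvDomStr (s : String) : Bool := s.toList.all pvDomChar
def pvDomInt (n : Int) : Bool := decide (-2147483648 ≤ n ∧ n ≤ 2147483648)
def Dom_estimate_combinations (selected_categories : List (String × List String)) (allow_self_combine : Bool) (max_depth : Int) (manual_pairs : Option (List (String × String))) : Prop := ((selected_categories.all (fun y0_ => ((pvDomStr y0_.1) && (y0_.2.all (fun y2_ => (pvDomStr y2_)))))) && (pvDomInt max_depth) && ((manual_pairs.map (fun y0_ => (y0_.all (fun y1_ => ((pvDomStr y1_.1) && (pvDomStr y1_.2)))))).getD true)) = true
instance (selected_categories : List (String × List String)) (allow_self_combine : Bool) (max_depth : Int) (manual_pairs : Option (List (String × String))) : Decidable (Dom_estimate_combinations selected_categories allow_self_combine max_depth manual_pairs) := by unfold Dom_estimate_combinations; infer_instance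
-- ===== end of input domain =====

-- B precomputes a {category: size} table in one pass and answers every mode from it; the
-- default pairwise mode becomes the closed form S^2 minus the sum of squared sizes
-- (when self-combining is disallowed) instead of A's double loop over the categories.

-- ===== PORT A =====
-- transliteration of A's non-manual path (categories = d.keys(); sum / double loop)
def ecA_rest (selected_categories : List (String × List String)) (allow_self_combine : Bool) (max_depth : Int) : Int :=
  let d := PySem.Dict.mk selected_categories
  let categories := d.keys
  if max_depth == 1 then
    (categories.map (fun c => ((d.getD c []).length : Int))).sum
  else
    categories.foldl (fun total cat_a =>
      categories.foldl (fun total cat_b =>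
        if !allow_self_combine && cat_a == cat_b then total
        else total + ((d.getD cat_a []).length : Int) * ((d.getD cat_b []).length : Int)) total) 0

def estimate_combinations (selected_categories : List (String × List String)) (allow_self_combine : Bool) (max_depth : Int) (manual_pairs : Option (List (String × String))) : Int :=
  match manual_pairs with
  | some pairs =>
    if pairs ≠ [] then  -- Python truthiness: `if manual_pairs:`
      pairs.foldl (fun count p =>
        count + (((PySem.Dict.mk selected_categories).getD p.1 []).length : Int)
              * (((PySem.Dict.mk selected_categories).getD p.2 []).length : Int)) 0
    else ecA_rest selected_categories allow_self_combine max_depth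
  | none => ecA_rest selected_categories allow_self_combine max_depth

-- ===== PORT B =====
-- `sizes = {cat: len(vals) for ...}`; `if manual_pairs:` is true exactly on `some (_ :: _)`
def estimate_combinations_alt (selected_categories : List (String × List String)) (allow_self_combine : Bool) (max_depth : Int) (manual_pairs : Option (List (String × String))) : Int :=
  let sizes := PySem.Dict.mk (selected_categories.map (fun kv => (kv.1, (kv.2.length : Int))))
  match manual_pairs with
  | some (q :: qs) =>
      ((q :: qs).map (fun ab => sizes.getD ab.1 0 * sizes.getD ab.2 0)).sum
  | _ =>
      let total := sizes.values.sum
      if max_depth == 1 then total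
      else total * total -
        (if allow_self_combine then 0 else (sizes.values.map (fun n => n * n)).sum)

-- ===== PRECONDITION & SPEC =====
-- Pre_: the association list encodes a Python dict, whose keys are necessarily distinct;
-- no input reachable from Python is excluded (a duplicate-key list corresponds to no dict).
def Pre_estimate_combinations (selected_categories : List (String × List String)) (allow_self_combine : Bool) (max_depth : Int) (manual_pairs : Option (List (String × String))) : Prop :=
  (selected_categories.map (fun p => p.1)).Nodup
instance (selected_categories : List (String × List String)) (allow_self_combine : Bool) (max_depth : Int) (manual_pairs : Option (List (String × String))) : Decidable (Pre_estimate_combinations selected_categories allow_self_combine max_depth manual_pairs) := by unfold Pre_estimate_combinations; infer_instance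

def pvWitness_estimate_combinations : (List (String × List String)) × Bool × Int × (Option (List (String × String))) :=
  ([("adj", ["red", "big"]), ("noun", ["cat"])], false, 2, none)

def Spec_estimate_combinations (selected_categories : List (String × List String)) (allow_self_combine : Bool) (max_depth : Int) (manual_pairs : Option (List (String × String))) (out : Int) : Prop := out = estimate_combinations_alt selected_categories allow_self_combine max_depth manual_pairs
instance (selected_categories : List (String × List String)) (allow_self_combine : Bool) (max_depth : Int) (manual_pairs : Option (List (String × String))) (out : Int) : Decidable (Spec_estimate_combinations selected_categories allow_self_combine max_depth manual_pairs out) := by unfold Spec_estimate_combinations; infer_instance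

-- ===== CLAIM (what is proved, stated in full; the proofs are below) =====
def Claim_equal_estimate_combinations : Prop := ∀ (selected_categories : List (String × List String)) (allow_self_combine : Bool) (max_depth : Int) (manual_pairs : Option (List (String × String))), Dom_estimate_combinations selected_categories allow_self_combine max_depth manual_pairs → Pre_estimate_combinations selected_categories allow_self_combine max_depth manual_pairs → Spec_estimate_combinations selected_categories allow_self_combine max_depth manual_pairs (estimate_combinations selected_categories allow_self_combine max_depth manual_pairs)

-- ===== LEMMAS AND PROOFS =====
-- B's sizes table looks up exactly the length A's lookup measures (no Nodup needed:
-- both sides take the first matching entry).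
theorem ec_sizes_get? (sc : List (String × List String)) (k : String) :
    (PySem.Dict.mk (sc.map (fun kv => (kv.1, (kv.2.length : Int))))).get? k
      = ((PySem.Dict.mk sc).get? k).map (fun v => (v.length : Int)) := by
  induction sc with
  | nil => rfl
  | cons p sc ih =>
    rw [List.map_cons]
    show (PySem.Dict.mk ((p.1, (p.2.length : Int)) :: _)).get? k = _
    rw [PySem.Dict.get?_mk_cons, PySem.Dict.get?_mk_cons]
    split <;> simp [ih]

theorem ec_sizes_getD (sc : List (String × List String)) (k : String) :
    (PySem.Dict.mk (sc.map (fun kv => (kv.1, (kv.2.length : Int))))).getD k 0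
      = (((PySem.Dict.mk sc).getD k []).length : Int) := by
  rw [PySem.Dict.getD_eq_get?_getD, PySem.Dict.getD_eq_get?_getD, ec_sizes_get?]
  cases (PySem.Dict.mk sc).get? k <;> rfl

theorem ec_sum_map_sub {α : Type} (l : List α) (u v : α → Int) :
    (l.map (fun a => u a - v a)).sum = (l.map u).sum - (l.map v).sum := by
  induction l with
  | nil => simp
  | cons a l ih => simp [ih]; ring

theorem ec_sum_map_mul_left {α : Type} (l : List α) (c : Int) (f : α → Int) :
    (l.map (fun b => c * f b)).sum = c * (l.map f).sum := by
  induction l with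
  | nil => simp
  | cons a l ih => simp [ih]; ring

theorem ec_sum_map_mul_right {α : Type} (l : List α) (c : Int) (f : α → Int) :
    (l.map (fun b => f b * c)).sum = (l.map f).sum * c := by
  induction l with
  | nil => simp
  | cons a l ih => simp [ih]; ring

theorem ec_sum_g_false (f : String → Int) (a : String) (ks : List String) (hnd : ks.Nodup) :
    (ks.map (fun b => if a == b then (0:Int) else f a * f b)).sum
      = f a * (ks.map f).sum - (if a ∈ ks then f a * f a else 0) := by
  induction ks with
  | nil => simp
  | cons b ks ih =>
    rcases List.nodup_cons.mp hnd with ⟨hb, hnd'⟩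
    rw [List.map_cons, List.sum_cons, List.map_cons, List.sum_cons, ih hnd']
    by_cases hab : a = b
    · subst hab
      rw [if_pos (by simp), if_neg hb, if_pos List.mem_cons_self]
      ring
    · rw [if_neg (by simpa using hab)]
      have hiff : a ∈ b :: ks ↔ a ∈ ks := by simp [hab]
      rw [if_congr hiff rfl rfl]
      split <;> ring

theorem ec_inner (f : String → Int) (self : Bool) (a : String) (ks : List String) (t : Int) :
    ks.foldl (fun t b => if !self && a == b then t else t + f a * f b) t
      = t + (ks.map (fun b => if !self && a == b then (0:Int) else f a * f b)).sum := by
  rw [PySem.List.foldl_congr_mem ks (fun t b => if !self && a == b then t else t + f a * f b)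
      (fun t b => t + (if !self && a == b then (0:Int) else f a * f b)) t
      (fun acc x _ => by dsimp only; split <;> omega),
    PySem.List.foldl_add]

-- A's double loop over distinct keys is S·S, minus the diagonal when self-combining is off.
theorem ec_pairwise (f : String → Int) (self : Bool) (ks : List String) (hnd : ks.Nodup) :
    ks.foldl (fun t a => ks.foldl (fun t b => if !self && a == b then t else t + f a * f b) t) 0
      = (if self then (ks.map f).sum * (ks.map f).sum
         else (ks.map f).sum * (ks.map f).sum - ((ks.map f).map (fun n => n * n)).sum) := by
  rw [PySem.List.foldl_congr_mem ks
      (fun t a => ks.foldl (fun t b => if !self && a == b then t else t + f a * f b) t)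
      (fun t a => t + (ks.map (fun b => if !self && a == b then (0:Int) else f a * f b)).sum) 0
      (fun acc x _ => ec_inner f self x ks acc),
    PySem.List.foldl_add]
  cases self with
  | true =>
    simp only [Bool.not_true, Bool.false_and, Bool.false_eq_true, if_false, if_true, zero_add]
    rw [List.map_congr_left (fun a _ => ec_sum_map_mul_left ks (f a) f)]
    exact ec_sum_map_mul_right ks _ f
  | false =>
    simp only [Bool.not_false, Bool.true_and, Bool.false_eq_true, if_false, zero_add]
    rw [List.map_congr_left (fun a ha => by
      rw [ec_sum_g_false f a ks hnd, if_pos ha])]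
    rw [ec_sum_map_sub, List.map_map]
    congr 1
    exact ec_sum_map_mul_right ks _ f

-- A's per-key size vector (over d.keys) is B's values of the sizes table.
theorem ec_key_sizes (sc : List (String × List String)) (hnd : (sc.map (fun p => p.1)).Nodup) :
    ((PySem.Dict.mk sc).keys).map (fun c => (((PySem.Dict.mk sc).getD c []).length : Int))
      = (PySem.Dict.mk (sc.map (fun kv => (kv.1, (kv.2.length : Int))))).values := by
  rw [PySem.Dict.values_mk, PySem.Dict.keys_mk, List.map_map, List.map_map]
  refine List.map_congr_left (fun p hp => ?_)
  have : (PySem.Dict.mk sc).getD p.1 [] = p.2 :=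
    PySem.Dict.getD_of_mem_items _ (by simpa using hp)
      (by simpa [PySem.Dict.keys_mk] using hnd) []
  simp [Function.comp, this]

theorem ec_main (sc : List (String × List String)) (self : Bool) (md : Int)
    (mp : Option (List (String × String))) (hnd : (sc.map (fun p => p.1)).Nodup) :
    estimate_combinations sc self md mp = estimate_combinations_alt sc self md mp := by
  have hrest : ecA_rest sc self md
      = (let sizes := PySem.Dict.mk (sc.map (fun kv => (kv.1, (kv.2.length : Int))))
         let total := sizes.values.sum
         if md == 1 then total
         else total * total -
           (if self then 0 else (sizes.values.map (fun n => n * n)).sum)) := by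
    simp only [ecA_rest]
    rw [show ((PySem.Dict.mk sc).keys).map (fun c => (((PySem.Dict.mk sc).getD c []).length : Int))
          = _ from ec_key_sizes sc hnd] at *
    have hk : (PySem.Dict.mk sc).keys.Nodup := by simpa [PySem.Dict.keys_mk] using hnd
    split
    · rfl
    · rw [ec_pairwise (fun c => (((PySem.Dict.mk sc).getD c []).length : Int)) self
        (PySem.Dict.mk sc).keys hk, ec_key_sizes sc hnd]
      cases self <;> simp
  cases mp with
  | none => simpa [estimate_combinations, estimate_combinations_alt] using hrest
  | some pairs =>
    cases pairs with
    | nil => simpa [estimate_combinations, estimate_combinations_alt] using hrest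
    | cons q qs =>
      simp only [estimate_combinations, estimate_combinations_alt, ne_eq,
        reduceCtorEq, not_false_eq_true, if_true]
      rw [PySem.List.foldl_add]
      simp [ec_sizes_getD]

-- ===== VERDICT (by name: the statement is the Claim_ definition above) =====
theorem estimate_combinations_spec : Claim_equal_estimate_combinations := by
  intro sc self md mp _ hpre
  exact ec_main sc self md mp hpre
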